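-- pv_equiv track=rewrite | github.com/balakamal/PythonPrograms | c6st6fs4barray.py | arrayDivision
-- ===== SOURCE A (Python) =====
-- def arrayDivision(N, K, A):
--     l = []
--     for i in range(1, N):
--         l.append(A[i - 1] - A[i])
--     l.sort()
--     res = A[N - 1] - A[0]
--     for i in range(K - 1):
--         res += l[i]
--
--     return res
-- ===== SOURCE B (Python) =====
-- def _sum_largest(xs, k):
--     # sum of the k largest elements of xs, by quickselect-style partitioning (no sort)
--     if k <= 0:
--         return 0
--     if len(xs) <= k:
--         return sum(xs)
--     p = xs[len(xs) // 2]
--     hi = [x for x in xs if x > p]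
--     eq = [x for x in xs if x == p]
--     lo = [x for x in xs if x < p]
--     if k <= len(hi):
--         return _sum_largest(hi, k)
--     if k <= len(hi) + len(eq):
--         return sum(hi) + p * (k - len(hi))
--     return sum(hi) + p * len(eq) + _sum_largest(lo, k - len(hi) - len(eq))
--
-- def arrayDivision(N, K, A):
--     # span minus the K-1 largest adjacent gaps, selected without sorting
--     gaps = [A[i] - A[i - 1] for i in range(1, N)]
--     return A[N - 1] - A[0] - _sum_largest(gaps, K - 1)
-- ===== Notes on version B (the rewrite author's own statement) =====
-- stated objective: alternative
-- what changed: B never builds or sorts the list of negated differences: it selects the K-1 largest adjacent gaps A[i]-A[i-1] by quickselect-style three-way partitioning (O(N) average, no sort) and subtracts their sum from the span A[N-1]-A[0].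
import Mathlib
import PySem

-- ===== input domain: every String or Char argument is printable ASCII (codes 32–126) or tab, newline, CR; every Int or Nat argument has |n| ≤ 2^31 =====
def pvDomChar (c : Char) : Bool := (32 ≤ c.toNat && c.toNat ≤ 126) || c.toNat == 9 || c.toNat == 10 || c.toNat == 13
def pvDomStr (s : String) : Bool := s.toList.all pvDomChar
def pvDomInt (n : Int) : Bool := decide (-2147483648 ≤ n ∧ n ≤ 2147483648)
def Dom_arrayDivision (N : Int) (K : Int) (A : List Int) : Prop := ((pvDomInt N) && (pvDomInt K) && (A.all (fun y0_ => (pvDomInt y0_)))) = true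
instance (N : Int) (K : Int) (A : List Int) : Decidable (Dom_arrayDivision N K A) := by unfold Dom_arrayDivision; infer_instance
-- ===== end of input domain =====

-- B selects the K-1 largest adjacent gaps by quickselect-style partitioning instead of
-- building and sorting the list of negated differences (alternative algorithm).

-- ===== PORT A =====
def arrayDivision (N : Int) (K : Int) (A : List Int) : Int :=
  let l : List Int := (PySem.List.pyRange 1 N 1).foldl
      (fun acc i => acc ++ [PySem.List.pyGetD A (i - 1) 0 - PySem.List.pyGetD A i 0]) []
  let ls := PySem.List.sorted l (fun x => x) false
  let res := PySem.List.pyGetD A (N - 1) 0 - PySem.List.pyGetD A 0 0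
  (PySem.List.pyRange 0 (K - 1) 1).foldl (fun res i => res + PySem.List.pyGetD ls i 0) res

-- ===== PORT B =====
-- sum of the k largest elements of xs (three-way partition around a pivot; no sort)
def sumLargest (xs : List Int) (k : Int) : Int :=
  if k ≤ 0 then 0
  else if (xs.length : Int) ≤ k then xs.sum
  else
    let p := PySem.List.pyGetD xs (PySem.Int.floordiv (xs.length : Int) 2) 0
    let hi := xs.filter (fun x => p < x)
    let eq := xs.filter (fun x => x = p)
    let lo := xs.filter (fun x => x < p)
    if k ≤ (hi.length : Int) then sumLargest hi k
    else if k ≤ (hi.length : Int) + (eq.length : Int) then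
      hi.sum + p * (k - hi.length)
    else
      hi.sum + p * (eq.length : Int) + sumLargest lo (k - hi.length - eq.length)
termination_by xs.length
decreasing_by
  all_goals
    have hflo : PySem.Int.floordiv ((xs.length : Int)) 2 = ((xs.length / 2 : Nat) : Int) :=
      PySem.Int.floordiv_natCast xs.length 2
    have hlt : xs.length / 2 < xs.length := by omega
    have hp : PySem.List.pyGetD xs (PySem.Int.floordiv ((xs.length : Int)) 2) 0 ∈ xs := by
      rw [hflo, PySem.List.pyGetD_natCast, List.getD_eq_getElem xs 0 hlt]
      exact List.getElem_mem hlt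
    simp only [List.length_unattach]
    exact lt_of_lt_of_le
      (List.length_filter_lt_length_iff_exists.mpr ⟨⟨_, hp⟩, List.mem_attach _ _, by simp⟩)
      (le_of_eq List.length_attach)

def arrayDivision_alt (N : Int) (K : Int) (A : List Int) : Int :=
  let gaps := (PySem.List.pyRange 1 N 1).map
      (fun i => PySem.List.pyGetD A i 0 - PySem.List.pyGetD A (i - 1) 0)
  PySem.List.pyGetD A (N - 1) 0 - PySem.List.pyGetD A 0 0 - sumLargest gaps (K - 1)

-- ===== PRECONDITION & SPEC =====
-- Pre_ is exactly the set of inputs where the Python A returns: either the intended shape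
-- (1 ≤ N ≤ len(A) with K ≤ N) or the degenerate N ≤ 0 reachable through negative indexing
-- (A[N-1] in range, K ≤ 1); everywhere else A raises IndexError.
def Pre_arrayDivision (N : Int) (K : Int) (A : List Int) : Prop :=
  (1 ≤ N ∧ N ≤ (A.length : Int) ∧ K ≤ N) ∨
  (1 ≤ (A.length : Int) ∧ 1 - (A.length : Int) ≤ N ∧ N ≤ 0 ∧ K ≤ 1)
instance (N : Int) (K : Int) (A : List Int) : Decidable (Pre_arrayDivision N K A) := by
  unfold Pre_arrayDivision; infer_instance

def pvWitness_arrayDivision : Int × Int × List Int := (3, 2, [1, 5, 6])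

def Spec_arrayDivision (N : Int) (K : Int) (A : List Int) (out : Int) : Prop := out = arrayDivision_alt N K A
instance (N : Int) (K : Int) (A : List Int) (out : Int) : Decidable (Spec_arrayDivision N K A out) := by unfold Spec_arrayDivision; infer_instance

-- ===== CLAIM (what is proved, stated in full; the proofs are below) =====
def Claim_equal_arrayDivision : Prop := ∀ (N : Int) (K : Int) (A : List Int), Dom_arrayDivision N K A → Pre_arrayDivision N K A → Spec_arrayDivision N K A (arrayDivision N K A)

-- ===== LEMMAS AND PROOFS =====

-- first t entries of xs read through getD are xs.take t
theorem map_getD_range_eq_take (xs : List Int) (t : Nat) (h : t ≤ xs.length) :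
    (List.range t).map (fun k => xs.getD k 0) = xs.take t := by
  apply List.ext_getElem
  · simp [h]
  · intro i h1 h2
    simp at h1 h2 ⊢
    rw [List.getElem?_eq_getElem (by omega)]
    rfl

-- sorting the negations = negating the reversed sorted list
theorem sorted_neg_eq (xs : List Int) :
    PySem.List.sorted (xs.map (fun x => -x)) (fun x => x) false
      = ((PySem.List.sorted xs (fun x => x) false).reverse).map (fun x => -x) := by
  apply PySem.List.eq_of_perm_of_pairwise_le_of_injective (fun x => x) (fun a b h => h)
  · exact (PySem.List.sorted_perm _ _ _).trans
      ((((List.reverse_perm _).map _).trans ((PySem.List.sorted_perm xs _ _).map _)).symm)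
  · exact PySem.List.sorted_pairwise _ _
  · have h := PySem.List.sorted_pairwise xs (fun x => x)
    simp only [List.pairwise_map, List.pairwise_reverse]
    exact h.imp (fun {a b} hab => by omega)

-- the three-way partition around any pivot, sorted pieces concatenated, IS the sorted list
theorem sorted_partition (xs : List Int) (p : Int) :
    PySem.List.sorted xs (fun x => x) false
      = PySem.List.sorted (xs.filter (fun x => x < p)) (fun x => x) false
        ++ xs.filter (fun x => x = p)
        ++ PySem.List.sorted (xs.filter (fun x => p < x)) (fun x => x) false := by
  have hperm : (xs.filter (fun x => x < p)
        ++ (xs.filter (fun x => x = p) ++ xs.filter (fun x => p < x))).Perm xs := by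
    have h1 := List.filter_append_perm (fun x => decide (x < p)) xs
    have h2 := List.filter_append_perm (fun x => decide (x = p))
        (xs.filter (fun x => !decide (x < p)))
    rw [List.filter_filter, List.filter_filter] at h2
    have e1 : xs.filter (fun a => decide (a = p) && !decide (a < p))
        = xs.filter (fun x => decide (x = p)) := by
      apply List.filter_congr; intro x _
      by_cases hx : x = p <;> simp [hx]
    have e2 : xs.filter (fun a => !decide (a = p) && !decide (a < p))
        = xs.filter (fun x => decide (p < x)) := by
      apply List.filter_congr; intro x _
      by_cases h3 : p < x <;> by_cases h4 : x = p <;> simp [h3, h4] <;> omega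
    rw [e1, e2] at h2
    exact ((List.Perm.refl _).append h2).trans h1
  apply Eq.symm
  apply PySem.List.eq_of_perm_of_pairwise_le_of_injective (fun x => x) (fun a b h => h)
  · refine List.Perm.trans ?_ (PySem.List.sorted_perm xs _ _).symm
    rw [List.append_assoc]
    exact (((PySem.List.sorted_perm _ _ _).append
      ((List.Perm.refl _).append (PySem.List.sorted_perm _ _ _))).trans hperm)
  · rw [List.append_assoc, List.pairwise_append]
    refine ⟨PySem.List.sorted_pairwise _ _, ?_, ?_⟩
    · rw [List.pairwise_append]
      refine ⟨?_, PySem.List.sorted_pairwise _ _, ?_⟩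
      · have hall : ∀ x ∈ xs.filter (fun x => x = p), x = p := by
          intro x hx; simpa using (List.mem_filter.mp hx).2
        have hpw : ∀ (L : List Int), (∀ x ∈ L, x = p) → L.Pairwise (fun a b => a ≤ b) := by
          intro L
          induction L with
          | nil => intro _; exact List.Pairwise.nil
          | cons a t ih =>
              intro h
              refine List.Pairwise.cons ?_ (ih (fun x hx => h x (by simp [hx])))
              intro b hb
              rw [h a (by simp), h b (by simp [hb])]
        exact hpw _ hall
      · intro a ha b hb
        have ha' : a = p := by simpa using (List.mem_filter.mp ha).2
        simp only [PySem.List.mem_sorted] at hb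
        have hb' : p < b := by simpa using (List.mem_filter.mp hb).2
        omega
    · intro a ha b hb
      simp only [PySem.List.mem_sorted] at ha
      have ha' : a < p := by simpa using (List.mem_filter.mp ha).2
      rcases List.mem_append.mp hb with hb | hb
      · have hb' : b = p := by simpa using (List.mem_filter.mp hb).2
        omega
      · simp only [PySem.List.mem_sorted] at hb
        have hb' : p < b := by simpa using (List.mem_filter.mp hb).2
        omega
  · exact PySem.List.sorted_pairwise _ _

-- quickselect-style selection computes the sum of the k largest = the dropped-prefix sum of the sorted list
-- strong induction on the length for the recursion of sumLargest
theorem sumLargest_eq_aux : ∀ (n : Nat) (xs : List Int), xs.length ≤ n → ∀ (k : Int),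
    sumLargest xs k
      = ((PySem.List.sorted xs (fun x => x) false).drop (xs.length - k.toNat)).sum := by
  intro n
  induction n with
  | zero =>
      intro xs hle k
      have hnil : xs = [] := List.eq_nil_of_length_eq_zero (by omega)
      subst hnil
      rw [sumLargest]
      have hs : PySem.List.sorted ([] : List Int) (fun x => x) false = [] := rfl
      split_ifs with h1 h2
      · simp [hs]
      · simp [hs]
      · exact absurd (by simpa using (by omega : (0:Int) ≤ k)) h2
  | succ m ih =>
      intro xs hle k
      rw [sumLargest]
      simp only []
      split_ifs with hk hlen hhi heq
      · -- k ≤ 0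
        have h0 : k.toNat = 0 := by omega
        rw [h0, Nat.sub_zero,
          List.drop_eq_nil_of_le (by rw [PySem.List.length_sorted])]
        rfl
      · -- the whole list
        have h0 : xs.length - k.toNat = 0 := by omega
        rw [h0, List.drop_zero]
        exact ((PySem.List.sorted_perm xs _ _).sum_eq).symm
      all_goals
        set p := PySem.List.pyGetD xs (PySem.Int.floordiv (xs.length : Int) 2) 0 with hpdef
        have hp : p ∈ xs := by
          have hflo : PySem.Int.floordiv ((xs.length : Int)) 2 = ((xs.length / 2 : Nat) : Int) := by
            exact_mod_cast PySem.Int.floordiv_natCast xs.length 2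
          rw [hpdef, hflo, PySem.List.pyGetD_natCast,
            List.getD_eq_getElem xs 0 (by omega : xs.length / 2 < xs.length)]
          exact List.getElem_mem _
        set hi := xs.filter (fun x => decide (p < x)) with hhidef
        set eq := xs.filter (fun x => decide (x = p)) with heqdef
        set lo := xs.filter (fun x => decide (x < p)) with hlodef
        have hpart := sorted_partition xs p
        rw [← hhidef, ← heqdef, ← hlodef] at hpart
        have hlSlo : (PySem.List.sorted lo (fun x => x) false).length = lo.length :=
          PySem.List.length_sorted _ _ _
        have hlShi : (PySem.List.sorted hi (fun x => x) false).length = hi.length :=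
          PySem.List.length_sorted _ _ _
        have htot : lo.length + eq.length + hi.length = xs.length := by
          have := congrArg List.length hpart
          simp only [List.length_append, PySem.List.length_sorted] at this
          omega
        have hSloSum : (PySem.List.sorted lo (fun x => x) false).sum = lo.sum :=
          (PySem.List.sorted_perm _ _ _).sum_eq
        have hShiSum : (PySem.List.sorted hi (fun x => x) false).sum = hi.sum :=
          (PySem.List.sorted_perm _ _ _).sum_eq
        have heqrep : eq = List.replicate eq.length p :=
          List.eq_replicate_iff.mpr ⟨rfl, fun b hb => by simpa using (List.mem_filter.mp hb).2⟩
        rw [hpart, List.drop_append, List.drop_append]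
      -- k ≤ |hi| : recurse into hi
      · have hhilt : hi.length < xs.length :=
          List.length_filter_lt_length_iff_exists.mpr ⟨p, hp, by simp⟩
        rw [List.drop_eq_nil_of_le (as := PySem.List.sorted lo (fun x => x) false)
            (by rw [hlSlo]; omega),
          List.drop_eq_nil_of_le (as := eq) (by rw [hlSlo]; omega)]
        simp only [List.nil_append, List.append_nil]
        rw [ih hi (by omega) k]
        rw [show xs.length - k.toNat
              - ((PySem.List.sorted lo (fun x => x) false) ++ eq).length
            = hi.length - k.toNat from by simp only [List.length_append, hlSlo]; omega]
      -- |hi| < k ≤ |hi| + |eq| : the pivot block supplies the rest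
      · rw [List.drop_eq_nil_of_le (as := PySem.List.sorted lo (fun x => x) false)
            (by rw [hlSlo]; omega)]
        rw [show xs.length - k.toNat
              - ((PySem.List.sorted lo (fun x => x) false) ++ eq).length = 0
            from by simp only [List.length_append, hlSlo]; omega, List.drop_zero]
        conv_rhs => rw [heqrep, List.drop_replicate]
        simp only [List.nil_append, List.sum_append, List.sum_replicate, nsmul_eq_mul]
        rw [hShiSum]
        have hc : (((eq.length - (xs.length - k.toNat
              - (PySem.List.sorted lo (fun x => x) false).length)) : Nat) : Int)
            = k - hi.length := by rw [hlSlo]; omega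
        rw [hc]
        ring
      -- |hi| + |eq| < k : take hi and eq whole, recurse into lo
      · have hlolt : lo.length < xs.length :=
          List.length_filter_lt_length_iff_exists.mpr ⟨p, hp, by simp⟩
        rw [ih lo (by omega) (k - hi.length - eq.length)]
        rw [show xs.length - k.toNat
              - ((PySem.List.sorted lo (fun x => x) false) ++ eq).length = 0
            from by simp only [List.length_append, hlSlo]; omega, List.drop_zero]
        rw [show xs.length - k.toNat - (PySem.List.sorted lo (fun x => x) false).length = 0
            from by rw [hlSlo]; omega, List.drop_zero]
        simp only [List.sum_append]
        have heqsum : eq.sum = (eq.length : Int) * p := by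
          conv_lhs => rw [heqrep]
          simp
        rw [hShiSum, heqsum]
        have hidx : lo.length - (k - (hi.length : Int) - (eq.length : Int)).toNat
            = xs.length - k.toNat := by omega
        rw [hidx]
        ring

theorem sumLargest_eq (xs : List Int) (k : Int) :
    sumLargest xs k
      = ((PySem.List.sorted xs (fun x => x) false).drop (xs.length - k.toNat)).sum :=
  sumLargest_eq_aux xs.length xs le_rfl k

-- ===== VERDICT (by name: the statement is the Claim_ definition above) =====
theorem arrayDivision_spec : Claim_equal_arrayDivision := by
  intro N K A _ hpre
  unfold Spec_arrayDivision arrayDivision arrayDivision_alt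
  simp only [PySem.List.foldl_append_singleton_eq_map, List.nil_append, PySem.List.foldl_add]
  set d : Int → Int := fun i => PySem.List.pyGetD A (i - 1) 0 - PySem.List.pyGetD A i 0 with hd
  have hneg : (PySem.List.pyRange 1 N 1).map (fun i => PySem.List.pyGetD A i 0 - PySem.List.pyGetD A (i - 1) 0)
      = ((PySem.List.pyRange 1 N 1).map d).map (fun x => -x) := by
    rw [List.map_map]; apply List.map_congr_left; intro i _; simp [hd]
  set l : List Int := (PySem.List.pyRange 1 N 1).map d with hl
  set S := PySem.List.sorted l (fun x => x) false with hS
  have hlenl : l.length = (N - 1).toNat := by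
    simp [hl, PySem.List.length_pyRange_one]
  have hlenS : S.length = (N - 1).toNat := by
    rw [hS, PySem.List.length_sorted, hlenl]
  have hj : (K - 1).toNat ≤ S.length := by
    rcases hpre with ⟨h1, h2, h3⟩ | ⟨h1, h2, h3, h4⟩ <;> omega
  -- A's summed prefix: the K-1 smallest elements of S
  have hrange : (PySem.List.pyRange 0 (K - 1)).map (fun x => PySem.List.pyGetD S x 0)
      = S.take (K - 1).toNat := by
    rw [PySem.List.pyRange_one, List.map_map]
    have hfun : ((fun x => PySem.List.pyGetD S x 0) ∘ fun k : Nat => 0 + (k : Int))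
        = fun k : Nat => S.getD k 0 := by
      funext k; simp
    rw [show (K - 1 - 0 : Int) = K - 1 by ring, hfun,
        map_getD_range_eq_take S ((K - 1).toNat) hj]
  rw [hrange, hneg, sumLargest_eq, sorted_neg_eq l, ← hS]
  have hmlen : (l.map (fun x => -x)).length = l.length := by simp
  rw [hmlen]
  rw [← List.map_drop, List.drop_reverse]
  have he : S.length - (l.length - (K - 1).toNat) = (K - 1).toNat := by omega
  rw [he, ← List.sum_neg, List.sum_reverse]
  ring
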